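-- pv_equiv track=rewrite | github.com/iteegi/algoritmicus | algoritmicus/hard/zigzig_traverse.py | zigzag_traverse
-- ===== SOURCE A (Python) =====
-- from collections.abc import Sequence
--
-- def zigzag_traverse(array: Sequence[Sequence[int]]) -> Sequence[int]:
--     """Return a one-dimensional array of all the array's elements in zigzag
--     order.
--
--     O(n) time | O(n) space.
--
--     :param array: A two-dimensional array.
--     :type array: Sequence[Sequence[int]]
--     :return: A one-dimensional array of all the array's elements in zigzag
--     order.
--     :rtype: Sequence[int]
--     """
--     height = len(array) - 1
--     width = len(array[0]) - 1
--     result = []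
--     row, col = 0, 0
--     going_down = True
--
--     while not _is_out_of_bounds(row, col, height, width):
--         result.append(array[row][col])
--         if going_down:
--             if col == 0 or row == height:
--                 going_down = False
--                 if row == height:
--                     col += 1
--                 else:
--                     row += 1
--             else:
--                 row += 1
--                 col -= 1
--         else:
--             if row == 0 or col == width:
--                 going_down = True
--                 if col == width:
--                     row += 1
--                 else:
--                     col += 1
--             else:
--                 row -= 1
--                 col += 1
--     return result
--
-- def _is_out_of_bounds(row: int, col: int, height: int, width: int) -> bool:
--     return row < 0 or row > height or col < 0 or col > width
-- ===== SOURCE B (Python) =====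
-- def zigzag_traverse(array):
--     height = len(array) - 1
--     width = len(array[0]) - 1
--     result = []
--     for d in range(height + width + 1):
--         r_low = max(0, d - width)
--         r_high = min(height, d)
--         rows = range(r_low, r_high + 1)
--         if d % 2:
--             rows = reversed(rows)
--         for r in rows:
--             result.append(array[r][d - r])
--     return result
-- ===== Notes on version B (the rewrite author's own statement) =====
-- stated objective: faster
-- what changed: Replaces A's stateful zigzag walker (row/col cursor with a going_down flag and per-step turn logic) by direct enumeration of the anti-diagonals d = r+c, emitting each diagonal forward or reversed by the parity of d.
import Mathlib
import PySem

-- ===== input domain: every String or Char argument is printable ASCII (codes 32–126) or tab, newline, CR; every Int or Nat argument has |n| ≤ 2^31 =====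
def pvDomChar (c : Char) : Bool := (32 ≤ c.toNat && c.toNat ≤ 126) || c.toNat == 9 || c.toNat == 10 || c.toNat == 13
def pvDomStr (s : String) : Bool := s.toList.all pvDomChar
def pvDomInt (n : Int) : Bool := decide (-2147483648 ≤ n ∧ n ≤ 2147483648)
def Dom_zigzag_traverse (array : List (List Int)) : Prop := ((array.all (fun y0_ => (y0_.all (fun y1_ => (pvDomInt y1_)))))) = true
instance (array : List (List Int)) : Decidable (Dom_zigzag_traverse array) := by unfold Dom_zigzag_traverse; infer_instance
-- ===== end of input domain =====

-- B replaces A's stateful zigzag cursor walk by direct enumeration of anti-diagonals, alternating direction by parity (objective: faster — a timing run measured B faster by a constant factor).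

-- ===== PORT A =====
-- array[r][c]; total via default (Python raises only outside Pre_)
def pvCell (a : List (List Int)) (r c : Int) : Int :=
  PySem.List.pyGetD (PySem.List.pyGetD a r []) c 0

-- the while-loop of A, state (row, col, going_down); guard is _is_out_of_bounds.
-- fuel only makes the recursion structural: it exceeds the number of loop iterations (fuel sufficiency is proved in fuel_ok below).
def zigzagLoop (a : List (List Int)) (height width : Int) (fuel : Nat) (row col : Int) (gd : Bool) : List Int :=
  match fuel with
  | 0 => []
  | Nat.succ fuel =>
    if row < 0 ∨ row > height ∨ col < 0 ∨ col > width then []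
    else
      let x := pvCell a row col
      match gd with
      | true =>
        if col = 0 ∨ row = height then
          if row = height then x :: zigzagLoop a height width fuel row (col + 1) false
          else x :: zigzagLoop a height width fuel (row + 1) col false
        else x :: zigzagLoop a height width fuel (row + 1) (col - 1) true
      | false =>
        if row = 0 ∨ col = width then
          if col = width then x :: zigzagLoop a height width fuel (row + 1) col true
          else x :: zigzagLoop a height width fuel row (col + 1) true
        else x :: zigzagLoop a height width fuel (row - 1) (col + 1) false

def zigzag_traverse (array : List (List Int)) : List Int :=
  let height : Int := (array.length : Int) - 1
  let width : Int := ((array.headD []).length : Int) - 1   -- array[0]: raises in Python iff array = [] (excluded by Pre_)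
  zigzagLoop array height width ((array.length + (array.headD []).length + 1) * (array.length + 1) + 1) 0 0 true

-- ===== PORT B =====
def zigzag_traverse_alt (array : List (List Int)) : List Int :=
  let height : Int := (array.length : Int) - 1
  let width : Int := ((array.headD []).length : Int) - 1
  (PySem.List.pyRange 0 (height + width + 1) 1).foldl (fun result d =>
    let rLow : Int := max 0 (d - width)
    let rHigh : Int := min height d
    let rows := PySem.List.pyRange rLow (rHigh + 1) 1
    let rows := if PySem.Int.mod d 2 ≠ 0 then rows.reverse else rows
    rows.foldl (fun res r => res ++ [pvCell array r (d - r)]) result) []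

-- ===== PRECONDITION & SPEC =====
-- Pre_ excludes exactly the inputs where Python A raises: the empty array (IndexError on array[0]),
-- and arrays whose first row is non-empty while some row is shorter than it (IndexError on array[row][col]).
def Pre_zigzag_traverse (array : List (List Int)) : Prop :=
  array ≠ [] ∧ ((array.headD []).length = 0 ∨ ∀ row ∈ array, (array.headD []).length ≤ row.length)
instance (array : List (List Int)) : Decidable (Pre_zigzag_traverse array) := by
  unfold Pre_zigzag_traverse; infer_instance

def pvWitness_zigzag_traverse : List (List Int) := [[1, 2, 3], [4, 5, 6], [7, 8, 9]]

def Spec_zigzag_traverse (array : List (List Int)) (out : List Int) : Prop := out = zigzag_traverse_alt array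
instance (array : List (List Int)) (out : List Int) : Decidable (Spec_zigzag_traverse array out) := by unfold Spec_zigzag_traverse; infer_instance

-- ===== CLAIM (what is proved, stated in full; the proofs are below) =====
def Claim_equal_zigzag_traverse : Prop := ∀ (array : List (List Int)), Dom_zigzag_traverse array → Pre_zigzag_traverse array → Spec_zigzag_traverse array (zigzag_traverse array)

-- ===== LEMMAS AND PROOFS =====

-- one anti-diagonal d, forward (dir = true) or reversed
def pvSeg (a : List (List Int)) (H W d : Int) (dir : Bool) : List Int :=
  let rs := PySem.List.pyRange (max 0 (d - W)) (min H d + 1) 1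
  (if dir then rs else rs.reverse).map (fun r => pvCell a r (d - r))

-- diagonals from d on, alternating direction starting with dir
def pvDiags (a : List (List Int)) (H W d : Int) (dir : Bool) : List Int :=
  if h : H + W < d then []
  else pvSeg a H W d dir ++ pvDiags a H W (d + 1) (!dir)
termination_by (H + W + 1 - d).toNat
decreasing_by omega

-- what A's loop produces from an arbitrary state: the rest of the current diagonal, then the remaining diagonals
def pvRest (a : List (List Int)) (H W row col : Int) (gd : Bool) : List Int :=
  if row < 0 ∨ row > H ∨ col < 0 ∨ col > W then []
  else (if gd then (PySem.List.pyRange row (min H (row + col) + 1) 1).map (fun r => pvCell a r (row + col - r))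
        else ((PySem.List.pyRange (max 0 (row + col - W)) (row + 1) 1).reverse).map (fun r => pvCell a r (row + col - r)))
       ++ pvDiags a H W (row + col + 1) (!gd)

-- ===== VERDICT (by name: the statement is the Claim_ definition above) =====

lemma pvDiags_stop (a : List (List Int)) (H W d : Int) (dir : Bool) (hd : H + W < d) :
    pvDiags a H W d dir = [] := by
  rw [pvDiags]; simp [hd]

lemma pvDiags_step (a : List (List Int)) (H W d : Int) (dir : Bool) (hd : d ≤ H + W) :
    pvDiags a H W d dir = pvSeg a H W d dir ++ pvDiags a H W (d + 1) (!dir) := by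
  rw [pvDiags]; simp [show ¬ (H + W < d) by omega]

lemma rest_enter_true (a : List (List Int)) (H W row col : Int)
    (hg : ¬(row < 0 ∨ row > H ∨ col < 0 ∨ col > W)) (hr : row = max 0 (row + col - W)) :
    pvRest a H W row col true = pvDiags a H W (row + col) true := by
  rw [pvRest, if_neg hg]
  conv_rhs => rw [pvDiags_step a H W _ _ (by omega)]
  rw [pvSeg]
  simp only [if_true, ← hr, Bool.not_true]

lemma rest_enter_false (a : List (List Int)) (H W row col : Int)
    (hg : ¬(row < 0 ∨ row > H ∨ col < 0 ∨ col > W)) (hr : row = min H (row + col)) :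
    pvRest a H W row col false = pvDiags a H W (row + col) false := by
  rw [pvRest, if_neg hg]
  conv_rhs => rw [pvDiags_step a H W _ _ (by omega)]
  rw [pvSeg]
  simp only [Bool.false_eq_true, if_false, ← hr, Bool.not_false]


lemma seg_len_le (a : List (List Int)) (H W d : Int) (dir : Bool) :
    (pvSeg a H W d dir).length ≤ (H + 1).toNat := by
  rw [pvSeg]
  cases dir <;>
    simp [PySem.List.length_pyRange_one] <;> omega

lemma diags_len_le (a : List (List Int)) (H W : Int) :
    ∀ (n : Nat) (d : Int) (dir : Bool), (H + W + 1 - d).toNat = n →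
      (pvDiags a H W d dir).length ≤ n * (H + 1).toNat := by
  intro n
  induction n with
  | zero =>
    intro d dir hn
    rw [pvDiags_stop a H W d dir (by omega)]
    simp
  | succ n ih =>
    intro d dir hn
    rw [pvDiags_step a H W d dir (by omega), List.length_append, Nat.succ_mul]
    have h1 := seg_len_le a H W d dir
    have h2 := ih (d + 1) (!dir) (by omega)
    omega

lemma loop_eq_rest (a : List (List Int)) (H W : Int) :
    ∀ (fuel : Nat) (row col : Int) (gd : Bool),
      (pvRest a H W row col gd).length < fuel →
      zigzagLoop a H W fuel row col gd = pvRest a H W row col gd := by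
  intro fuel
  induction fuel with
  | zero => intro row col gd h; exact absurd h (by omega)
  | succ fuel ih =>
    intro row col gd hlen
    by_cases hg : row < 0 ∨ row > H ∨ col < 0 ∨ col > W
    · rw [zigzagLoop, if_pos hg, pvRest, if_pos hg]
    · cases gd with
      | true =>
        by_cases hc : col = 0 ∨ row = H
        · by_cases hrh : row = H
          · subst hrh
            have key : pvRest a row W row col true = pvCell a row col :: pvRest a row W row (col + 1) false := by
              rw [pvRest, if_neg hg]
              rw [show min row (row + col) = row by omega, PySem.List.pyRange_one_singleton]
              simp only [if_true, List.map_cons, List.map_nil, show row + col - row = col by ring,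
                List.cons_append, List.nil_append, Bool.not_true]
              by_cases hcol : col = W
              · rw [pvDiags_stop a row W _ _ (by omega)]
                rw [pvRest, if_pos (by omega)]
              · rw [rest_enter_false a row W row (col + 1) (by omega) (by omega),
                  show row + (col + 1) = row + col + 1 by ring]
            have hlen' : (pvRest a row W row (col + 1) false).length < fuel := by
              rw [key] at hlen; simp only [List.length_cons] at hlen; omega
            rw [zigzagLoop, if_neg hg]
            simp only [eq_self_iff_true, or_true, if_true]
            rw [ih row (col + 1) false hlen', key]
          · have hc0 : col = 0 := by tauto
            subst hc0
            have key : pvRest a H W row 0 true = pvCell a row 0 :: pvRest a H W (row + 1) 0 false := by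
              rw [pvRest, if_neg hg]
              rw [show min H (row + 0) = row by omega, PySem.List.pyRange_one_singleton]
              simp only [if_true, List.map_cons, List.map_nil, show row + 0 - row = (0:Int) by ring,
                List.cons_append, List.nil_append, Bool.not_true]
              rw [rest_enter_false a H W (row + 1) 0 (by omega) (by omega)]
              rw [show row + 0 + 1 = row + 1 + 0 by ring]
            have hlen' : (pvRest a H W (row + 1) 0 false).length < fuel := by
              rw [key] at hlen; simp only [List.length_cons] at hlen; omega
            rw [zigzagLoop, if_neg hg]
            simp only [eq_self_iff_true, true_or, if_true, if_neg hrh]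
            rw [ih (row + 1) 0 false hlen', key]
        · have key : pvRest a H W row col true = pvCell a row col :: pvRest a H W (row + 1) (col - 1) true := by
            rw [pvRest, if_neg hg]
            conv_rhs => rw [pvRest, if_neg (show ¬((row:Int) + 1 < 0 ∨ row + 1 > H ∨ col - 1 < 0 ∨ col - 1 > W) by omega)]
            rw [PySem.List.pyRange_one_cons (by omega)]
            simp only [if_true, List.map_cons, show row + col - row = col by ring,
              List.cons_append, show row + 1 + (col - 1) = row + col by ring]
          have hlen' : (pvRest a H W (row + 1) (col - 1) true).length < fuel := by
            rw [key] at hlen; simp only [List.length_cons] at hlen; omega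
          rw [zigzagLoop, if_neg hg]
          simp only [if_neg hc]
          rw [ih (row + 1) (col - 1) true hlen', key]
      | false =>
        by_cases hc : row = 0 ∨ col = W
        · by_cases hcw : col = W
          · subst hcw
            have key : pvRest a H col row col false = pvCell a row col :: pvRest a H col (row + 1) col true := by
              rw [pvRest, if_neg hg]
              rw [show max 0 (row + col - col) = row by omega, PySem.List.pyRange_one_singleton]
              simp only [Bool.false_eq_true, if_false, List.reverse_singleton, List.map_cons,
                List.map_nil, show row + col - row = col by ring, List.cons_append, List.nil_append,
                Bool.not_false]
              by_cases hrow : row = H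
              · rw [pvDiags_stop a H col _ _ (by omega)]
                rw [pvRest, if_pos (by omega)]
              · rw [rest_enter_true a H col (row + 1) col (by omega) (by omega),
                  show row + col + 1 = row + 1 + col by ring]
            have hlen' : (pvRest a H col (row + 1) col true).length < fuel := by
              rw [key] at hlen; simp only [List.length_cons] at hlen; omega
            rw [zigzagLoop, if_neg hg]
            simp only [eq_self_iff_true, or_true, if_true]
            rw [ih (row + 1) col true hlen', key]
          · have hr0 : row = 0 := by tauto
            subst hr0
            have key : pvRest a H W 0 col false = pvCell a 0 col :: pvRest a H W 0 (col + 1) true := by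
              rw [pvRest, if_neg hg]
              rw [show max 0 ((0:Int) + col - W) = 0 by omega, PySem.List.pyRange_one_singleton]
              simp only [Bool.false_eq_true, if_false, List.reverse_singleton, List.map_cons,
                List.map_nil, show (0:Int) + col - 0 = col by ring, List.cons_append, List.nil_append,
                Bool.not_false]
              rw [rest_enter_true a H W 0 (col + 1) (by omega) (by omega)]
              rw [show (0:Int) + col + 1 = 0 + (col + 1) by ring]
            have hlen' : (pvRest a H W 0 (col + 1) true).length < fuel := by
              rw [key] at hlen; simp only [List.length_cons] at hlen; omega
            rw [zigzagLoop, if_neg hg]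
            simp only [eq_self_iff_true, true_or, if_true, if_neg hcw]
            rw [ih 0 (col + 1) true hlen', key]
        · have key : pvRest a H W row col false = pvCell a row col :: pvRest a H W (row - 1) (col + 1) false := by
            rw [pvRest, if_neg hg]
            conv_rhs => rw [pvRest, if_neg (show ¬((row:Int) - 1 < 0 ∨ row - 1 > H ∨ col + 1 < 0 ∨ col + 1 > W) by omega)]
            rw [PySem.List.pyRange_one_succ_right (show max 0 (row + col - W) ≤ row by omega)]
            simp only [Bool.false_eq_true, if_false, List.reverse_append, List.reverse_singleton,
              List.map_cons, show row + col - row = col by ring, List.cons_append, List.nil_append,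
              show row - 1 + (col + 1) = row + col by ring, show row - 1 + 1 = row by ring]
          have hlen' : (pvRest a H W (row - 1) (col + 1) false).length < fuel := by
            rw [key] at hlen; simp only [List.length_cons] at hlen; omega
          rw [zigzagLoop, if_neg hg]
          simp only [if_neg hc]
          rw [ih (row - 1) (col + 1) false hlen', key]

lemma diags_nil' (a : List (List Int)) (H W : Int) (hW : W < 0) :
    ∀ (n : Nat) (d : Int) (dir : Bool), (H + W + 1 - d).toNat = n → pvDiags a H W d dir = [] := by
  intro n
  induction n with
  | zero =>
    intro d dir hn
    exact pvDiags_stop a H W d dir (by omega)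
  | succ n ih =>
    intro d dir hn
    rw [pvDiags_step a H W d dir (by omega), pvSeg]
    simp only [PySem.List.pyRange_one_eq_nil (show min H d + 1 ≤ max 0 (d - W) by omega),
      List.reverse_nil, ite_self, List.map_nil, List.nil_append]
    exact ih (d + 1) (!dir) (by omega)

lemma alt_foldl_eq_diags' (a : List (List Int)) (H W : Int) :
    ∀ (n : Nat) (d : Int) (dir : Bool) (acc : List Int), (H + W + 1 - d).toNat = n →
      ((PySem.Int.mod d 2 = 0) ↔ dir = true) →
      (PySem.List.pyRange d (H + W + 1) 1).foldl (fun result e =>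
        (if PySem.Int.mod e 2 ≠ 0 then (PySem.List.pyRange (max 0 (e - W)) (min H e + 1) 1).reverse
         else PySem.List.pyRange (max 0 (e - W)) (min H e + 1) 1).foldl
          (fun res r => res ++ [pvCell a r (e - r)]) result) acc
      = acc ++ pvDiags a H W d dir := by
  intro n
  induction n with
  | zero =>
    intro d dir acc hn hpar
    rw [PySem.List.pyRange_one_eq_nil (by omega), List.foldl_nil,
      pvDiags_stop a H W d dir (by omega), List.append_nil]
  | succ n ih =>
    intro d dir acc hn hpar
    rw [PySem.List.pyRange_one_cons (by omega), List.foldl_cons]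
    have hstep : (if PySem.Int.mod d 2 ≠ 0 then (PySem.List.pyRange (max 0 (d - W)) (min H d + 1) 1).reverse
         else PySem.List.pyRange (max 0 (d - W)) (min H d + 1) 1).foldl
          (fun res r => res ++ [pvCell a r (d - r)]) acc = acc ++ pvSeg a H W d dir := by
      cases dir with
      | true =>
        rw [if_neg (by simp only [ne_eq, not_not]; exact hpar.mpr rfl), pvSeg]
        simp only [if_true]
        exact PySem.List.foldl_append_singleton_eq_map _ _ _
      | false =>
        rw [if_pos (show PySem.Int.mod d 2 ≠ 0 by
          simp only [Bool.false_eq_true, iff_false] at hpar; exact hpar), pvSeg]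
        simp only [Bool.false_eq_true, if_false]
        exact PySem.List.foldl_append_singleton_eq_map _ _ _
    have hpar' : PySem.Int.mod (d + 1) 2 = 0 ↔ (!dir) = true := by
      cases dir with
      | true =>
        have h1 : d % 2 = 0 := by
          rw [← PySem.Int.mod_eq_emod_of_pos (by norm_num : (0:Int) < 2)]; exact hpar.mpr rfl
        rw [PySem.Int.mod_eq_emod_of_pos (by norm_num : (0:Int) < 2)]
        simp only [Bool.not_true, Bool.false_eq_true, iff_false]
        omega
      | false =>
        have h1 : ¬ d % 2 = 0 := by
          rw [← PySem.Int.mod_eq_emod_of_pos (by norm_num : (0:Int) < 2)]; simpa using hpar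
        rw [PySem.Int.mod_eq_emod_of_pos (by norm_num : (0:Int) < 2)]
        simp only [Bool.not_false, iff_true]
        omega
    have hIH := ih (d + 1) (!dir) (acc ++ pvSeg a H W d dir) (by omega) hpar'
    rw [hstep, hIH, pvDiags_step a H W d dir (by omega), List.append_assoc]


lemma fuel_ok (a : List (List Int)) :
    (pvRest a ((a.length : Int) - 1) (((a.headD []).length : Int) - 1) 0 0 true).length
      < (a.length + (a.headD []).length + 1) * (a.length + 1) + 1 := by
  by_cases hg : ((0:Int) < 0 ∨ (0:Int) > (a.length : Int) - 1 ∨ (0:Int) < 0 ∨ (0:Int) > ((a.headD []).length : Int) - 1)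
  · rw [pvRest, if_pos hg]
    simp only [List.length_nil]
    omega
  · rw [pvRest, if_neg hg]
    simp only [eq_self_iff_true, if_true, Bool.not_true, List.length_append, List.length_map]
    rw [show min ((a.length : Int) - 1) ((0:Int) + 0) = 0 by omega]
    rw [PySem.List.length_pyRange_one]
    have hd := diags_len_le a ((a.length : Int) - 1) (((a.headD []).length : Int) - 1)
      ((a.length : Int) - 1 + (((a.headD []).length : Int) - 1)).toNat ((0:Int) + 0 + 1) false (by omega)
    have h1 : ((a.length : Int) - 1 + (((a.headD []).length : Int) - 1)).toNat
        = a.length + (a.headD []).length - 2 := by omega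
    have h2 : ((a.length : Int) - 1 + 1).toNat = a.length := by omega
    rw [h1, h2] at hd
    have h3 : (a.length + (a.headD []).length - 2) * a.length
        < (a.length + (a.headD []).length + 1) * (a.length + 1) := by
      calc (a.length + (a.headD []).length - 2) * a.length
          ≤ (a.length + (a.headD []).length + 1) * a.length :=
            Nat.mul_le_mul_right _ (by omega)
        _ < (a.length + (a.headD []).length + 1) * (a.length + 1) :=
            Nat.mul_lt_mul_of_le_of_lt (Nat.le_refl _) (by omega) (by omega)
    omega

theorem zz_main (a : List (List Int)) (hpre : Pre_zigzag_traverse a) :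
    zigzag_traverse a = zigzag_traverse_alt a := by
  have hne : a ≠ [] := hpre.1
  have hH : (0:Int) ≤ (a.length : Int) - 1 := by
    have : a.length ≠ 0 := fun h => hne (List.eq_nil_of_length_eq_zero h)
    omega
  simp only [zigzag_traverse, zigzag_traverse_alt]
  rw [loop_eq_rest a _ _ _ 0 0 true (fuel_ok a)]
  rw [alt_foldl_eq_diags' a _ _ _ 0 true [] rfl (by decide)]
  rw [List.nil_append]
  by_cases hW : ((a.headD []).length : Int) - 1 < 0
  · rw [pvRest, if_pos (by omega)]
    exact (diags_nil' a _ _ hW _ 0 true rfl).symm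
  · rw [rest_enter_true a _ _ 0 0 (by omega) (by omega)]
    norm_num

-- ===== VERDICT (by name: the statement is the Claim_ definition above) =====
theorem zigzag_traverse_spec : Claim_equal_zigzag_traverse := by
  intro a _hdom hpre
  exact zz_main a hpre
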